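-- pv_equiv track=rewrite | github.com/Zyphoriate/SDU-CyberScience-Undergrad-Lectures | 2026/Spring/OperatingSystem/LabWorks/OS_lab2/gen.py | remap_indent_levels
-- ===== SOURCE A (Python) =====
-- from typing import Dict, List, Tuple
--
-- def remap_indent_levels(lines: List[str]) -> List[str]:
--     indents: List[int] = []
--
--     for line in lines:
--         if not line or line[0] not in " +-":
--             continue
--         body = line[1:].expandtabs(4)
--         if not body.strip():
--             continue
--         leading = len(body) - len(body.lstrip(" "))
--         indents.append(leading)
--
--     if not indents:
--         return lines
--
--     min_indent = min(indents)
--     normalized_levels = sorted({indent - min_indent for indent in indents})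
--     level_rank = {level: rank for rank, level in enumerate(normalized_levels)}
--
--     normalized: List[str] = []
--     for line in lines:
--         if not line or line[0] not in " +-":
--             normalized.append(line)
--             continue
--
--         prefix = line[0]
--         body = line[1:].expandtabs(4)
--         if not body.strip():
--             normalized.append(prefix)
--             continue
--
--         leading = len(body) - len(body.lstrip(" "))
--         relative_level = leading - min_indent
--         mapped_level = level_rank.get(relative_level, 0)
--         normalized.append(prefix + ("\t" * mapped_level) + body.lstrip(" "))
--
--     return normalized
-- ===== SOURCE B (Python) =====
-- from typing import List, Optional
--
--
-- def _width(line: str) -> Optional[int]: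
--     """Expanded leading-space width of a marker line's non-blank body, else None."""
--     if not line or line[0] not in " +-":
--         return None
--     body = line[1:].expandtabs(4)
--     if not body.strip():
--         return None
--     return len(body) - len(body.lstrip(" "))
--
--
-- def _render(line: str, widths) -> str:
--     if not line or line[0] not in " +-":
--         return line
--     body = line[1:].expandtabs(4)
--     stripped = body.lstrip(" ")
--     if not body.strip():
--         return line[0]
--     w = len(body) - len(stripped)
--     # order statistic by counting: the tab level of a line is the number of
--     # DISTINCT widths strictly below its own -- no sorting, no rank table,
--     # no min-subtraction needed (all three preserve exactly this count).
--     level = sum(1 for v in widths if v < w)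
--     return line[0] + "\t" * level + stripped
--
--
-- def remap_indent_levels(lines: List[str]) -> List[str]:
--     widths = {w for w in map(_width, lines) if w is not None}
--     if not widths:
--         return lines
--     return [_render(line, widths) for line in lines]
-- ===== Notes on version B (the rewrite author's own statement) =====
-- stated objective: alternative
-- what changed: B drops A's whole rank machinery (min-subtraction, sorted distinct levels, enumerate rank dictionary): each line's tab level is computed directly as the count of distinct widths strictly smaller than its own (an order statistic by counting over the width set), with parsing and rendering factored into per-line helpers and comprehensions.
import Mathlib
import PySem

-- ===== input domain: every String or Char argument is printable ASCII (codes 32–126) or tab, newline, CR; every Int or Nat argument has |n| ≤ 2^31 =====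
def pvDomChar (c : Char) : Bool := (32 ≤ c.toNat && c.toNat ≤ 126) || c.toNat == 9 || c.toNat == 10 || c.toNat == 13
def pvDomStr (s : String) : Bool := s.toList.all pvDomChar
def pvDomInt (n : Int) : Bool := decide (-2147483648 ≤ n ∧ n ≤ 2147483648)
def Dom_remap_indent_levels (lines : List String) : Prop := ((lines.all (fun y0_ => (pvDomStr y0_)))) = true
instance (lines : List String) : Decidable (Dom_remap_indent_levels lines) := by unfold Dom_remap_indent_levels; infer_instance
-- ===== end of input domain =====

-- B replaces A's min-shift + sort + enumerate rank dictionary by a direct order statistic: a line's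
-- tab level is the count of distinct widths strictly below its own — alternative algorithm, same results.

-- shared primitive: str.expandtabs(4) (not in PySem) — exact: tab fills to the next
-- multiple-of-4 column, '\n'/'\r' reset the column, every other char advances it by 1
def pvExpandTabs4 : List Char → Nat → List Char
  | [], _ => []
  | c :: rest, col =>
    if c = '\t' then
      List.replicate (4 - col % 4) ' ' ++ pvExpandTabs4 rest (col + (4 - col % 4))
    else if c = '\n' ∨ c = '\r' then c :: pvExpandTabs4 rest 0
    else c :: pvExpandTabs4 rest (col + 1)

-- ===== PORT A =====
def remap_indent_levels (lines : List String) : List String :=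
  let indents : List Int := lines.foldl (fun acc line =>
    match line.toList with
    | [] => acc
    | c :: rest =>
      if c = ' ' ∨ c = '+' ∨ c = '-' then
        let body := pvExpandTabs4 rest 0
        if PySem.Chars.strip body = [] then acc
        else acc ++ [((body.length : Int) - ((body.dropWhile (fun ch => ch = ' ')).length : Int))]
      else acc) []
  if indents = [] then lines
  else
    -- min(indents): the list is nonempty here, so min? is some; getD 0 extracts it
    let min_indent := (PySem.List.min? indents (fun x => x)).getD 0
    let normalized_levels :=
      PySem.List.sorted (PySem.Set.ofList (indents.map (fun i => i - min_indent))) (fun x => x) false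
    let level_rank : PySem.Dict Int Int :=
      (PySem.List.enumerate normalized_levels 0).foldl (fun d p => d.insert p.2 p.1) PySem.Dict.empty
    lines.foldl (fun out line =>
      match line.toList with
      | [] => out ++ [line]
      | c :: rest =>
        if c = ' ' ∨ c = '+' ∨ c = '-' then
          let body := pvExpandTabs4 rest 0
          if PySem.Chars.strip body = [] then out ++ [String.ofList [c]]
          else
            let stripped := body.dropWhile (fun ch => ch = ' ')
            let leading : Int := (body.length : Int) - (stripped.length : Int)
            let mapped := level_rank.getD (leading - min_indent) 0
            out ++ [String.ofList (c :: (List.replicate mapped.toNat '\t' ++ stripped))]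
        else out ++ [line]) []

-- ===== PORT B =====
-- _width(line): Some (expanded leading-space width) for a marker line with non-blank body, else none
def pvWidth (line : String) : Option Int :=
  match line.toList with
  | [] => none
  | c :: rest =>
    if c = ' ' ∨ c = '+' ∨ c = '-' then
      let body := pvExpandTabs4 rest 0
      if PySem.Chars.strip body = [] then none
      else some ((body.length : Int) - ((body.dropWhile (fun ch => ch = ' ')).length : Int))
    else none

-- _render(line, widths): tab level = number of distinct widths strictly below the line's own
def pvRenderB (line : String) (widths : PySem.Set Int) : String :=
  match line.toList with
  | [] => line
  | c :: rest =>
    if c = ' ' ∨ c = '+' ∨ c = '-' then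
      let body := pvExpandTabs4 rest 0
      let stripped := body.dropWhile (fun ch => ch = ' ')
      if PySem.Chars.strip body = [] then String.ofList [c]
      else
        let w : Int := (body.length : Int) - (stripped.length : Int)
        let level : Int := widths.foldl (fun acc v => if v < w then acc + 1 else acc) 0
        String.ofList (c :: (List.replicate level.toNat '\t' ++ stripped))
    else line

def remap_indent_levels_alt (lines : List String) : List String :=
  let widths : PySem.Set Int := PySem.Set.ofList ((lines.map pvWidth).filterMap id)
  if widths = [] then lines
  else lines.map (fun line => pvRenderB line widths)

-- ===== PRECONDITION & SPEC =====
def Spec_remap_indent_levels (lines : List String) (out : List String) : Prop := out = remap_indent_levels_alt lines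
instance (lines : List String) (out : List String) : Decidable (Spec_remap_indent_levels lines out) := by unfold Spec_remap_indent_levels; infer_instance

-- ===== CLAIM (what is proved, stated in full; the proofs are below) =====
def Claim_equal_remap_indent_levels : Prop := ∀ (lines : List String), Dom_remap_indent_levels lines → Spec_remap_indent_levels lines (remap_indent_levels lines)

-- ===== LEMMAS AND PROOFS =====

-- A's first pass collects exactly the widths B's pvWidth assigns, in order with duplicates
theorem pv_indentsA (lines : List String) (acc : List Int) :
    lines.foldl (fun acc line =>
      match line.toList with
      | [] => acc
      | c :: rest =>
        if c = ' ' ∨ c = '+' ∨ c = '-' then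
          let body := pvExpandTabs4 rest 0
          if PySem.Chars.strip body = [] then acc
          else acc ++ [((body.length : Int) - ((body.dropWhile (fun ch => ch = ' ')).length : Int))]
        else acc) acc
    = acc ++ lines.filterMap pvWidth := by
  induction lines generalizing acc with
  | nil => simp
  | cons l t ih =>
    rw [List.foldl_cons, ih, List.filterMap_cons]
    cases h : pvWidth l with
    | none =>
      unfold pvWidth at h
      cases hl : l.toList with
      | nil => simp
      | cons c rest =>
        rw [hl] at h
        by_cases hc : c = ' ' ∨ c = '+' ∨ c = '-'
        · simp only [if_pos hc] at h
          by_cases hs : PySem.Chars.strip (pvExpandTabs4 rest 0) = []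
          · simp [hs]
          · simp [hs] at h
        · simp [hc]
    | some w =>
      unfold pvWidth at h
      cases hl : l.toList with
      | nil => rw [hl] at h; simp at h
      | cons c rest =>
        rw [hl] at h
        by_cases hc : c = ' ' ∨ c = '+' ∨ c = '-'
        · simp only [if_pos hc] at h
          by_cases hs : PySem.Chars.strip (pvExpandTabs4 rest 0) = []
          · simp [hs] at h
          · simp only [hs, ite_false, Option.some.injEq] at h
            simp [hc, hs, h, List.append_assoc]
        · simp [hc] at h

theorem pv_ofList_eq_nil_iff (xs : List Int) : PySem.Set.ofList xs = [] ↔ xs = [] := by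
  constructor
  · intro h
    cases xs with
    | nil => rfl
    | cons x t =>
      exfalso
      have hx : x ∈ PySem.Set.ofList (x :: t) := by
        rw [PySem.Set.mem_ofList]; exact List.mem_cons_self
      rw [h] at hx
      exact (List.not_mem_nil) hx
  · intro h; subst h; rfl

theorem pv_set_add_map_sub (s : PySem.Set Int) (m x : Int) :
    PySem.Set.add (s.map (fun y => y - m)) (x - m) = (PySem.Set.add s x).map (fun y => y - m) := by
  have hmem : ((x - m) ∈ s.map (fun y => y - m)) ↔ x ∈ s := by
    constructor
    · intro h
      rcases List.mem_map.1 h with ⟨y, hy, he⟩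
      have hxy : y = x := by omega
      exact hxy ▸ hy
    · intro h; exact List.mem_map.2 ⟨x, h, rfl⟩
  by_cases h : x ∈ s
  · have h2 : (x - m) ∈ s.map (fun y => y - m) := hmem.2 h
    simp [PySem.Set.add, PySem.Set.contains, List.contains_eq_mem, h, h2]
  · have h2 : ¬ (x - m) ∈ s.map (fun y => y - m) := fun hc => h (hmem.1 hc)
    simp [PySem.Set.add, PySem.Set.contains, List.contains_eq_mem, h, h2]

theorem pv_ofList_map_sub (xs : List Int) (m : Int) :
    PySem.Set.ofList (xs.map (fun x => x - m)) = (PySem.Set.ofList xs).map (fun x => x - m) := by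
  have gen : ∀ (l : List Int) (s : PySem.Set Int),
      (l.map (fun x => x - m)).foldl PySem.Set.add (s.map (fun x => x - m))
      = (l.foldl PySem.Set.add s).map (fun x => x - m) := by
    intro l
    induction l with
    | nil => intro s; simp
    | cons x t ih =>
      intro s
      rw [List.map_cons, List.foldl_cons, List.foldl_cons, pv_set_add_map_sub, ih]
  have h1 := gen xs []
  simpa [PySem.Set.ofList_eq_foldl] using h1

theorem pv_sorted_map_sub (xs : List Int) (m : Int) :
    PySem.List.sorted ((PySem.Set.ofList xs).map (fun x => x - m)) (fun x => x) false
    = (PySem.List.sorted (PySem.Set.ofList xs) (fun x => x) false).map (fun x => x - m) := by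
  apply PySem.List.sorted_eq_of_perm_of_pairwise_lt
  · exact List.Perm.map _ (PySem.List.sorted_perm (PySem.Set.ofList xs) (fun x => x) false)
  · have hp := PySem.List.sorted_ofList_pairwise_lt (xs := xs)
    exact List.Pairwise.map _ (fun h => by omega) hp

theorem pv_rank_shift (ls : List Int) (m l : Int) (start : Int)
    (d d' : PySem.Dict Int Int) (h : ∀ k, d'.getD (k - m) 0 = d.getD k 0) :
    ((PySem.List.enumerate (ls.map (fun x => x - m)) start).foldl
        (fun d p => d.insert p.2 p.1) d').getD (l - m) 0
    = ((PySem.List.enumerate ls start).foldl (fun d p => d.insert p.2 p.1) d).getD l 0 := by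
  induction ls generalizing d d' start with
  | nil => simpa [PySem.List.enumerate_nil] using h l
  | cons x t ih =>
    rw [List.map_cons, PySem.List.enumerate_cons, PySem.List.enumerate_cons,
      List.foldl_cons, List.foldl_cons]
    apply ih
    intro k
    rw [PySem.Dict.getD_insert, PySem.Dict.getD_insert]
    by_cases hk : k = x
    · subst hk; simp
    · rw [if_neg (fun he => hk (by omega)), if_neg hk, h]

-- ranking the min-shifted widths (A) gives the same rank as ranking the raw widths
theorem pv_rank (inds : List Int) (m l : Int) :
    ((PySem.List.enumerate
        (PySem.List.sorted (PySem.Set.ofList (inds.map (fun i => i - m))) (fun x => x) false) 0).foldl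
      (fun d p => d.insert p.2 p.1) PySem.Dict.empty).getD (l - m) 0
    = ((PySem.List.enumerate
        (PySem.List.sorted (PySem.Set.ofList inds) (fun x => x) false) 0).foldl
      (fun d p => d.insert p.2 p.1) PySem.Dict.empty).getD l 0 := by
  rw [pv_ofList_map_sub, pv_sorted_map_sub]
  exact pv_rank_shift _ m l 0 _ _ (fun k => by simp)

-- keys not in the enumerated list are untouched by the rank-dict fold
theorem pv_lookup_not_mem (ls : List Int) (l : Int) :
    ∀ (start : Int) (d : PySem.Dict Int Int), l ∉ ls →
    ((PySem.List.enumerate ls start).foldl (fun d p => d.insert p.2 p.1) d).getD l 0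
    = d.getD l 0 := by
  induction ls with
  | nil => intro start d _; simp [PySem.List.enumerate_nil]
  | cons x t ih =>
    intro start d hl
    rw [PySem.List.enumerate_cons, List.foldl_cons,
      ih _ _ (fun h => hl (List.mem_cons_of_mem _ h)), PySem.Dict.getD_insert,
      if_neg (fun he => hl (by rw [he]; exact List.mem_cons_self))]

-- rank-dict lookup on a strictly increasing list = start + count of elements below l
theorem pv_lookup_sorted (ls : List Int) (l : Int) :
    ∀ (start : Int) (d : PySem.Dict Int Int), ls.Pairwise (· < ·) → l ∈ ls →
    ((PySem.List.enumerate ls start).foldl (fun d p => d.insert p.2 p.1) d).getD l 0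
    = start + (ls.countP (fun v => decide (v < l)) : Int) := by
  induction ls with
  | nil => intro start d _ hl; exact absurd hl List.not_mem_nil
  | cons x t ih =>
    intro start d hp hl
    rw [List.pairwise_cons] at hp
    rw [PySem.List.enumerate_cons, List.foldl_cons, List.countP_cons]
    rcases List.mem_cons.1 hl with he | ht
    · subst he
      have hnt : l ∉ t := fun h => lt_irrefl l (hp.1 l h)
      rw [pv_lookup_not_mem t l _ _ hnt, PySem.Dict.getD_insert, if_pos rfl]
      have hz : t.countP (fun v => decide (v < l)) = 0 :=
        List.countP_eq_zero.2 (fun a ha => by simpa using not_lt.2 (le_of_lt (hp.1 a ha)))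
      simp [hz]
    · rw [ih _ _ hp.2 ht]
      have hx : x < l := hp.1 l ht
      simp only [hx, decide_true]
      push_cast
      ring

-- one step of A's second pass renders exactly B's rendering of the line
theorem pv_step2 (inds : List Int) (m : Int) (out : List String) (line : String)
    (hmem : ∀ w, pvWidth line = some w → w ∈ inds) :
    (match line.toList with
      | [] => out ++ [line]
      | c :: rest =>
        if c = ' ' ∨ c = '+' ∨ c = '-' then
          let body := pvExpandTabs4 rest 0
          if PySem.Chars.strip body = [] then out ++ [String.ofList [c]]
          else
            let stripped := body.dropWhile (fun ch => ch = ' ')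
            let leading : Int := (body.length : Int) - (stripped.length : Int)
            let mapped := ((PySem.List.enumerate
                (PySem.List.sorted (PySem.Set.ofList (inds.map (fun i => i - m))) (fun x => x) false) 0).foldl
              (fun d p => d.insert p.2 p.1) PySem.Dict.empty).getD (leading - m) 0
            out ++ [String.ofList (c :: (List.replicate mapped.toNat '\t' ++ stripped))]
        else out ++ [line])
    = out ++ [pvRenderB line (PySem.Set.ofList inds)] := by
  unfold pvRenderB
  cases h : line.toList with
  | nil => simp
  | cons c rest =>
    by_cases hc : c = ' ' ∨ c = '+' ∨ c = '-'
    · simp only [if_pos hc]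
      by_cases hs : PySem.Chars.strip (pvExpandTabs4 rest 0) = []
      · simp [hs]
      · simp only [hs, ite_false]
        have hw : pvWidth line = some (((pvExpandTabs4 rest 0).length : Int)
            - (((pvExpandTabs4 rest 0).dropWhile (fun ch => ch = ' ')).length : Int)) := by
          unfold pvWidth
          rw [h]
          simp [hc, hs]
        have hm := hmem _ hw
        have hrank : ((PySem.List.enumerate
              (PySem.List.sorted (PySem.Set.ofList (inds.map (fun i => i - m))) (fun x => x) false) 0).foldl
              (fun d p => d.insert p.2 p.1) PySem.Dict.empty).getD
              ((((pvExpandTabs4 rest 0).length : Int)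
                - (((pvExpandTabs4 rest 0).dropWhile (fun ch => ch = ' ')).length : Int)) - m) 0
            = (PySem.Set.ofList inds).foldl (fun acc v =>
                if v < (((pvExpandTabs4 rest 0).length : Int)
                  - (((pvExpandTabs4 rest 0).dropWhile (fun ch => ch = ' ')).length : Int))
                then acc + 1 else acc) 0 := by
          rw [pv_rank inds m, pv_lookup_sorted _ _ 0 _
              (PySem.List.sorted_ofList_pairwise_lt inds)
              (by rw [PySem.List.mem_sorted, PySem.Set.mem_ofList]; exact hm),
            PySem.List.foldl_ite_add_one,
            List.Perm.countP_eq _ (PySem.List.sorted_perm (PySem.Set.ofList inds) (fun x => x) false)]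
        simp only [hrank]
    · simp [hc]

-- A's whole second pass is B's render map over the lines
theorem pv_pass2 (inds : List Int) (m : Int) (ls : List String) (out : List String)
    (h : ∀ line ∈ ls, ∀ w, pvWidth line = some w → w ∈ inds) :
    ls.foldl (fun out line =>
      match line.toList with
      | [] => out ++ [line]
      | c :: rest =>
        if c = ' ' ∨ c = '+' ∨ c = '-' then
          let body := pvExpandTabs4 rest 0
          if PySem.Chars.strip body = [] then out ++ [String.ofList [c]]
          else
            let stripped := body.dropWhile (fun ch => ch = ' ')
            let leading : Int := (body.length : Int) - (stripped.length : Int)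
            let mapped := ((PySem.List.enumerate
                (PySem.List.sorted (PySem.Set.ofList (inds.map (fun i => i - m))) (fun x => x) false) 0).foldl
              (fun d p => d.insert p.2 p.1) PySem.Dict.empty).getD (leading - m) 0
            out ++ [String.ofList (c :: (List.replicate mapped.toNat '\t' ++ stripped))]
        else out ++ [line]) out
    = out ++ ls.map (fun line => pvRenderB line (PySem.Set.ofList inds)) := by
  revert h
  induction ls generalizing out with
  | nil => intro _; simp
  | cons l t ih =>
    intro h
    rw [List.foldl_cons, pv_step2 inds m out l (fun w hw => h l List.mem_cons_self w hw),
      ih _ (fun line hl w hw => h line (List.mem_cons_of_mem _ hl) w hw), List.map_cons]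
    simp

-- ===== VERDICT (by name: the statement is the Claim_ definition above) =====
theorem remap_indent_levels_spec : Claim_equal_remap_indent_levels := by
  unfold Claim_equal_remap_indent_levels
  intro lines _
  unfold Spec_remap_indent_levels remap_indent_levels remap_indent_levels_alt
  rw [pv_indentsA]
  simp only [List.nil_append, List.filterMap_map, Function.id_comp]
  by_cases hnil : lines.filterMap pvWidth = []
  · rw [hnil]
    rw [if_pos rfl, if_pos ((pv_ofList_eq_nil_iff _).2 rfl)]
  · rw [if_neg hnil, if_neg (fun h => hnil ((pv_ofList_eq_nil_iff _).1 h))]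
    rw [pv_pass2 _ _ _ _ (fun line hl w hw => List.mem_filterMap.2 ⟨line, hl, hw⟩)]
    simp
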